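-- pv_equiv track=rewrite | github.com/NartikoevNicholas/hh_test | task_1.py | get_new_list
-- ===== SOURCE A (Python) =====
-- def get_new_list(condition_break, list_price):
--     result = []
--     summa = 0
--     for i in range(len(list_price)):
--         summa += list_price[i]
--         if condition_break >= summa:
--             result.append([summa, i+1])
--         else:
--             break
--     return result
-- ===== SOURCE B (Python) =====
-- def get_new_list(condition_break, list_price):
--     # stage 1: materialize all prefix sums
--     sums = []
--     total = 0
--     for x in list_price:
--         total += x
--         sums.append(total)
--     # stage 2: length of the prefix that stays within the threshold
--     k = 0
--     while k < len(sums) and condition_break >= sums[k]: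
--         k += 1
--     # stage 3: shape the surviving prefix into [sum, 1-based index] pairs
--     return [[s, i] for i, s in enumerate(sums[:k], start=1)]
-- ===== Notes on version B (the rewrite author's own statement) =====
-- stated objective: alternative
-- what changed: A's single index loop with a running sum and an early break is replaced by three separate stages: materialize the whole prefix-sum list, then find the threshold cutoff length, then shape the surviving prefix into [sum, 1-based index] pairs; B trades the early exit for a simpler staged pipeline.
import Mathlib
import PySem

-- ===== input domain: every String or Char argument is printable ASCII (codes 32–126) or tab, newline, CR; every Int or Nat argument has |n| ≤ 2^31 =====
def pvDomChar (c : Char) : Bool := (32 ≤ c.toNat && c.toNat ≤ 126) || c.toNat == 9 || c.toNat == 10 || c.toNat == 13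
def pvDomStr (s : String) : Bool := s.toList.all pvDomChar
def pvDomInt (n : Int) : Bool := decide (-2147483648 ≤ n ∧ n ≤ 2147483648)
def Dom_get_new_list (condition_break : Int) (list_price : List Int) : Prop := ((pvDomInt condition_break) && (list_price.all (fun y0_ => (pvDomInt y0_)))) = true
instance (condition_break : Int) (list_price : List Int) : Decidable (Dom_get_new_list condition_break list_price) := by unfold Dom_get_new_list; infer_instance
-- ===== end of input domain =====

-- B replaces A's single running-sum loop with early break by three staged passes
-- (materialize all prefix sums, find the threshold cutoff, shape the output): an
-- alternative decomposition of the same O(n) task.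


-- ===== PORT A =====
-- A's loop: running sum, append [summa, i+1] while condition holds, break otherwise.
def pvGoA (condition_break summa : Int) (i : Nat) : List Int → List (List Int)
  | [] => []
  | x :: xs =>
    let s := summa + x
    if condition_break ≥ s then [s, (i : Int) + 1] :: pvGoA condition_break s (i + 1) xs
    else []

def get_new_list (condition_break : Int) (list_price : List Int) : List (List Int) :=
  pvGoA condition_break 0 0 list_price

-- ===== PORT B =====
-- stage 1 of Source B: the full prefix-sum list
def pvPrefixSums (total : Int) : List Int → List Int
  | [] => []
  | x :: xs => (total + x) :: pvPrefixSums (total + x) xs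

-- stage 2 of Source B: the while loop counting how many leading sums stay within the threshold
def pvCutoff (condition_break : Int) : List Int → Nat
  | [] => 0
  | s :: ss => if condition_break ≥ s then pvCutoff condition_break ss + 1 else 0

def get_new_list_alt (condition_break : Int) (list_price : List Int) : List (List Int) :=
  let sums := pvPrefixSums 0 list_price
  let k := pvCutoff condition_break sums
  -- stage 3 of Source B: enumerate(sums[:k], start=1) mapped to [s, i]
  ((sums.take k).zipIdx 1).map (fun p => [p.1, (p.2 : Int)])

-- ===== PRECONDITION & SPEC =====
def Spec_get_new_list (condition_break : Int) (list_price : List Int) (out : List (List Int)) : Prop := out = get_new_list_alt condition_break list_price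
instance (condition_break : Int) (list_price : List Int) (out : List (List Int)) : Decidable (Spec_get_new_list condition_break list_price out) := by unfold Spec_get_new_list; infer_instance

-- ===== CLAIM (what is proved, stated in full; the proofs are below) =====
def Claim_equal_get_new_list : Prop := ∀ (condition_break : Int) (list_price : List Int), Dom_get_new_list condition_break list_price → Spec_get_new_list condition_break list_price (get_new_list condition_break list_price)

-- ===== LEMMAS AND PROOFS =====
theorem pvGoA_eq (condition_break : Int) (xs : List Int) : ∀ (t : Int) (n : Nat),
    pvGoA condition_break t n xs =
      (((pvPrefixSums t xs).take (pvCutoff condition_break (pvPrefixSums t xs))).zipIdx (n + 1)).map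
        (fun p => [p.1, (p.2 : Int)]) := by
  induction xs with
  | nil => intro t n; simp [pvGoA, pvPrefixSums, pvCutoff]
  | cons x xs ih =>
    intro t n
    simp only [pvGoA, pvPrefixSums, pvCutoff]
    by_cases h : condition_break ≥ t + x
    · simp [h, ih (t + x) (n + 1)]
    · simp [h]

-- ===== VERDICT (by name: the statement is the Claim_ definition above) =====
theorem get_new_list_spec : Claim_equal_get_new_list := by
  intro cb lp _
  unfold Spec_get_new_list get_new_list get_new_list_alt
  exact pvGoA_eq cb lp 0 0
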